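-- pv_equiv track=rewrite | github.com/YezzuzBruno/ADA | insertionSort/insertionSort.py | generar_arreglos_best_case
-- ===== SOURCE A (Python) =====
-- def generar_arreglos_best_case(n):
--     result = []
--     for i in range (1, n+1):
--         lista = []
--         for j in range(1, i+1):
--             lista.append(j)
--         result.append(lista)
--     return result
-- ===== SOURCE B (Python) =====
-- def generar_arreglos_best_case(n):
--     result = []
--     cur = []
--     for i in range(1, n + 1):
--         cur = cur + [i]
--         result.append(cur)
--     return result
-- ===== Notes on version B (the rewrite author's own statement) =====
-- stated objective: faster
-- what changed: Each row is built by extending the previous row with one element (cur = cur + [i]) instead of rebuilding every row 1..i with an inner counting loop.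
import Mathlib
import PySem

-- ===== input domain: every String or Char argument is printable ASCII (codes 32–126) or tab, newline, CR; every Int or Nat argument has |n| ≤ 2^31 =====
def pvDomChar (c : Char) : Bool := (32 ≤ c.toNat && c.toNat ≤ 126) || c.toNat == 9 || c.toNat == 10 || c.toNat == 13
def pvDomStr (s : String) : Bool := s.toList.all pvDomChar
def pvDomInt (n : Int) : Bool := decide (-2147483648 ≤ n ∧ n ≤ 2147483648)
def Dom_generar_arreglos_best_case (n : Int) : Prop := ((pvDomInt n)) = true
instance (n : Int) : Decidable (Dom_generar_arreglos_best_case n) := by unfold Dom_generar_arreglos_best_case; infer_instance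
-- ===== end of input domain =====

-- B builds each row by extending the previous row with one element instead of
-- rebuilding every row with an inner counting loop; same return value.

-- ===== PORT A =====
-- for i in range(1, n+1): lista = []; for j in range(1, i+1): lista.append(j); result.append(lista)
def generar_arreglos_best_case (n : Int) : List (List Int) :=
  (PySem.List.pyRange 1 (n + 1) 1).foldl
    (fun result i =>
      result ++ [(PySem.List.pyRange 1 (i + 1) 1).foldl (fun lista j => lista ++ [j]) []])
    []

-- ===== PORT B =====
-- single loop; state (cur, result); cur = cur + [i]; result.append(cur)
def generar_arreglos_best_case_alt (n : Int) : List (List Int) :=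
  ((PySem.List.pyRange 1 (n + 1) 1).foldl
    (fun st i => (st.1 ++ [i], st.2 ++ [st.1 ++ [i]]))
    (([] : List Int), ([] : List (List Int)))).2

-- ===== PRECONDITION & SPEC =====
def Spec_generar_arreglos_best_case (n : Int) (out : List (List Int)) : Prop := out = generar_arreglos_best_case_alt n
instance (n : Int) (out : List (List Int)) : Decidable (Spec_generar_arreglos_best_case n out) := by unfold Spec_generar_arreglos_best_case; infer_instance

-- ===== CLAIM (what is proved, stated in full; the proofs are below) =====
def Claim_equal_generar_arreglos_best_case : Prop := ∀ (n : Int), Dom_generar_arreglos_best_case n → Spec_generar_arreglos_best_case n (generar_arreglos_best_case n)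

-- ===== LEMMAS AND PROOFS =====

-- A's inner loop just reproduces its range
theorem pv_inner_fold (L : List Int) (acc : List Int) :
    L.foldl (fun lista j => lista ++ [j]) acc = acc ++ L := by
  induction L generalizing acc with
  | nil => simp
  | cons x xs ih => simp [List.foldl, ih, List.append_assoc]

-- B's loop invariant over range 1..m: cur tracks the range seen so far,
-- result equals A's outer fold over the same range
theorem pv_key (m : Nat) :
    (((List.range m).map (fun (k : Nat) => (1 : Int) + k)).foldl
        (fun st i => (st.1 ++ [i], st.2 ++ [st.1 ++ [i]]))
        (([] : List Int), ([] : List (List Int))))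
    = ((List.range m).map (fun (k : Nat) => (1 : Int) + k),
       ((List.range m).map (fun (k : Nat) => (1 : Int) + k)).foldl
         (fun r i => r ++ [PySem.List.pyRange 1 (i + 1) 1]) []) := by
  induction m with
  | zero => simp
  | succ m ih =>
    rw [List.range_succ, List.map_append, List.foldl_append, List.foldl_append, ih]
    simp only [List.map_cons, List.map_nil, List.foldl_cons, List.foldl_nil]
    rw [Prod.mk.injEq]
    refine ⟨rfl, ?_⟩
    have hrow : PySem.List.pyRange 1 ((1 : Int) + m + 1) 1
        = (List.range (m + 1)).map (fun (k : Nat) => (1 : Int) + k) := by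
      have h2 : ((1 : Int) + m + 1 - 1).toNat = m + 1 := by omega
      rw [PySem.List.pyRange_one, h2]
    rw [hrow, List.range_succ, List.map_append]
    simp

-- ===== VERDICT (by name: the statement is the Claim_ definition above) =====
theorem generar_arreglos_best_case_spec : Claim_equal_generar_arreglos_best_case := by
  intro n _
  unfold Spec_generar_arreglos_best_case generar_arreglos_best_case generar_arreglos_best_case_alt
  have hr : PySem.List.pyRange 1 (n + 1) 1 = (List.range n.toNat).map (fun (k : Nat) => (1 : Int) + k) := by
    have h2 : ((n : Int) + 1 - 1).toNat = n.toNat := by omega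
    rw [PySem.List.pyRange_one, h2]
  rw [hr, pv_key n.toNat]
  simp only [pv_inner_fold, List.nil_append]
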